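-- pv_equiv track=rewrite | github.com/CentRa-Linux/sousaku-lottery | test.py | usparser
-- ===== SOURCE A (Python) =====
-- def usparser(input):  # 自作のアルティメットシンプルcsvパーサー
--     cnt = 0
--     val = ""
--     output = [[]]
--     chk = False
--     for i in input:
--         if i == ',':
--             output[cnt].append(val)
--             val = ""
--             chk = False
--         elif i == '\n':
--             output[cnt].append(val)
--             val = ""
--             output.append([])
--             cnt += 1
--         else:
--             val += i
--     return output
-- ===== SOURCE B (Python) =====
-- def usparser(input):
--     *head, last = input.split('\n')
--     return [line.split(',') for line in head] + [last.split(',')[:-1]]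
-- ===== Notes on version B (the rewrite author's own statement) =====
-- stated objective: faster
-- what changed: A's per-character state machine (counter, pending value, mutable row list) is replaced by splitting the string on newlines into lines and each line on commas into fields, dropping the trailing field of the last line (which A never flushes).
import Mathlib
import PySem

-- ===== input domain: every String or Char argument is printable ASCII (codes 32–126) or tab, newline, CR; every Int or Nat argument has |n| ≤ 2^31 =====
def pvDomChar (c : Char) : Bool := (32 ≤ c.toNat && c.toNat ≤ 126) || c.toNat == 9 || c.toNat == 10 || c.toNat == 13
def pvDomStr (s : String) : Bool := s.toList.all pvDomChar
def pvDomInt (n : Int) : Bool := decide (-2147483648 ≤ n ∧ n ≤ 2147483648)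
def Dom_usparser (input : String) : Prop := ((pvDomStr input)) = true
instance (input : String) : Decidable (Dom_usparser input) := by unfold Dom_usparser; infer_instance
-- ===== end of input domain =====

-- B replaces A's per-character scan with a split-into-lines then split-into-fields traversal (measured faster in a timing run); A = B proved on all inputs.

-- ===== PORT A =====
-- one step of A's for-loop; state = (cnt, val, output, chk); output[cnt].append(v) is List.modify at cnt
def usparserStep (s : Nat × List Char × List (List String) × Bool) (i : Char) :
    Nat × List Char × List (List String) × Bool :=
  if i = ',' then (s.1, [], s.2.2.1.modify s.1 (· ++ [String.ofList s.2.1]), false)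
  else if i = '\n' then (s.1 + 1, [], s.2.2.1.modify s.1 (· ++ [String.ofList s.2.1]) ++ [[]], s.2.2.2)
  else (s.1, s.2.1 ++ [i], s.2.2.1, s.2.2.2)

def usparser (input : String) : List (List String) :=
  (input.toList.foldl usparserStep (0, [], [[]], false)).2.2.1

-- ===== PORT B =====
-- Source B: *head, last = input.split('\n'); return [line.split(',') for line in head] + [last.split(',')[:-1]]
def usparser_alt (input : String) : List (List String) :=
  let lines := PySem.Chars.splitOn input.toList ['\n']
  let head := lines.dropLast
  let last := lines.getLastD []
  head.map (fun line => (PySem.Chars.splitOn line [',']).map String.ofList)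
    ++ [((PySem.Chars.splitOn last [',']).map String.ofList).dropLast]

-- ===== PRECONDITION & SPEC =====
def Spec_usparser (input : String) (out : List (List String)) : Prop := out = usparser_alt input
instance (input : String) (out : List (List String)) : Decidable (Spec_usparser input out) := by unfold Spec_usparser; infer_instance

-- ===== CLAIM (what is proved, stated in full; the proofs are below) =====
def Claim_equal_usparser : Prop := ∀ (input : String), Dom_usparser input → Spec_usparser input (usparser input)

-- ===== LEMMAS AND PROOFS =====

-- simple structural form of splitting a char list at a single-character separator
def splitCh (sep : Char) : List Char → List (List Char)
  | [] => [[]]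
  | c :: cs => if c = sep then [] :: splitCh sep cs
               else (c :: (splitCh sep cs).headD []) :: (splitCh sep cs).tail

lemma splitCh_cons_shape (sep : Char) (l : List Char) :
    ∃ r rs, splitCh sep l = r :: rs := by
  cases l with
  | nil => exact ⟨[], [], rfl⟩
  | cons c cs =>
    simp only [splitCh]
    split
    · exact ⟨_, _, rfl⟩
    · exact ⟨_, _, rfl⟩

lemma splitCh_ne_nil (sep : Char) (l : List Char) : splitCh sep l ≠ [] := by
  obtain ⟨r, rs, h⟩ := splitCh_cons_shape sep l
  simp [h]

-- PySem.Chars.splitOn with a single-character separator computes splitCh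
lemma splitOn_go_eq (sep : Char) : ∀ (fuel : Nat) (l cur acc : _), l.length ≤ fuel →
    PySem.Chars.splitOn.go [sep] fuel l cur acc
      = acc.reverse ++ (cur.reverse ++ (splitCh sep l).headD []) :: (splitCh sep l).tail := by
  intro fuel
  induction fuel with
  | zero =>
    intro l cur acc h
    have : l = [] := by cases l <;> simp_all
    subst this
    simp [PySem.Chars.splitOn.go, splitCh]
  | succ n ih =>
    intro l cur acc h
    cases l with
    | nil => simp [PySem.Chars.splitOn.go, splitCh]
    | cons c rest =>
      obtain ⟨r, rs, hS⟩ := splitCh_cons_shape sep rest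
      by_cases hc : c = sep
      · subst hc
        have hpre : List.isPrefixOf [c] (c :: rest) = true := by simp [List.isPrefixOf]
        rw [show PySem.Chars.splitOn.go [c] (n+1) (c :: rest) cur acc
              = PySem.Chars.splitOn.go [c] n (List.drop 1 (c :: rest)) [] (cur.reverse :: acc) by
            simp [PySem.Chars.splitOn.go, hpre]]
        rw [ih _ _ _ (by simpa using Nat.le_of_succ_le_succ h)]
        simp [splitCh, hS]
      · have hpre : List.isPrefixOf [sep] (c :: rest) = false := by
          simp [List.isPrefixOf]
          exact fun hh => absurd hh.symm hc
        rw [show PySem.Chars.splitOn.go [sep] (n+1) (c :: rest) cur acc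
              = PySem.Chars.splitOn.go [sep] n rest (c :: cur) acc by
            simp [PySem.Chars.splitOn.go, hpre]]
        rw [ih _ _ _ (by simpa using Nat.le_of_succ_le_succ h)]
        simp [splitCh, hc, hS]

lemma splitOn_single (sep : Char) (l : List Char) :
    PySem.Chars.splitOn l [sep] = splitCh sep l := by
  have h := splitOn_go_eq sep (l.length + 1) l [] [] (by omega)
  obtain ⟨r, rs, hS⟩ := splitCh_cons_shape sep l
  rw [show PySem.Chars.splitOn l [sep] = PySem.Chars.splitOn.go [sep] (l.length + 1) l [] [] from rfl,
    h, hS]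
  simp

-- splitting val ++ cs when val contains no separator
lemma splitCh_append_no_sep (sep : Char) : ∀ (val cs : List Char), (∀ c ∈ val, c ≠ sep) →
    splitCh sep (val ++ cs) = (val ++ (splitCh sep cs).headD []) :: (splitCh sep cs).tail := by
  intro val
  induction val with
  | nil =>
    intro cs _
    obtain ⟨r, rs, hS⟩ := splitCh_cons_shape sep cs
    simp [hS]
  | cons v vs ih =>
    intro cs h
    have hv : v ≠ sep := h v (by simp)
    simp only [List.cons_append, splitCh, if_neg hv, ih cs (fun c hc => h c (by simp [hc]))]
    simp

lemma splitCh_no_sep (sep : Char) (val : List Char) (h : ∀ c ∈ val, c ≠ sep) :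
    splitCh sep val = [val] := by
  have := splitCh_append_no_sep sep val [] h
  simpa [splitCh] using this

-- middle form: the rows produced by A's loop from suffix cs with pending value val;
-- fst = the remaining fields of the current row, snd = all later rows
def procB : List Char → List Char → List String × List (List String)
  | [], _ => ([], [])
  | c :: cs, val =>
    if c = ',' then ((String.ofList val) :: (procB cs []).1, (procB cs []).2)
    else if c = '\n' then ([String.ofList val], (procB cs []).1 :: (procB cs []).2)
    else procB cs (val ++ [c])

lemma getLastD_eq_getLast' {α : Type} (l : List α) (h : l ≠ []) (d : α) :
    l.getLastD d = l.getLast h := by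
  cases l with
  | nil => exact absurd rfl h
  | cons a t => simp [List.getLastD_eq_getLast?, List.getLast?_eq_some_getLast]

lemma getLastD_irrel {α : Type} (l : List α) (h : l ≠ []) (d d' : α) :
    l.getLastD d = l.getLastD d' := by
  rw [getLastD_eq_getLast' l h d, getLastD_eq_getLast' l h d']

lemma dropLast_getLastD {α : Type} (l : List α) (d : α) (h : l ≠ []) :
    l.dropLast ++ [l.getLastD d] = l := by
  rw [getLastD_eq_getLast' l h d]
  exact List.dropLast_concat_getLast h

-- output[cnt].append at cnt = len(output)-1 appends to the last row
lemma modify_last (f : List String → List String) :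
    ∀ (out : List (List String)), out ≠ [] →
      out.modify (out.length - 1) f = out.dropLast ++ [f (out.getLastD [])] := by
  intro out
  induction out with
  | nil => simp
  | cons x t ih =>
    intro _
    cases t with
    | nil => simp [List.modify]
    | cons y t' =>
      have h1 : (x :: y :: t').modify ((x :: y :: t').length - 1) f
          = x :: (y :: t').modify ((y :: t').length - 1) f := by
        rw [show (x :: y :: t').length - 1 = ((y :: t').length - 1) + 1 by simp,
          List.modify_succ_cons]
      have h2 : (x :: y :: t').getLastD [] = (y :: t').getLastD [] := by
        rw [List.getLastD_cons]
        exact getLastD_irrel _ (by simp) x []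
      have h3 : (x :: y :: t').dropLast = x :: (y :: t').dropLast :=
        List.dropLast_cons_of_ne_nil (by simp)
      rw [h1, ih (by simp), h2, h3, List.cons_append]

-- A's loop, characterised: starting from any nonempty output with cnt = len(output)-1
lemma usparser_loop : ∀ (cs : List Char) (val : List Char) (out : List (List String)) (chk : Bool),
    out ≠ [] →
    (List.foldl usparserStep (out.length - 1, val, out, chk) cs).2.2.1
      = out.dropLast ++ (out.getLastD [] ++ (procB cs val).1) :: (procB cs val).2 := by
  intro cs
  induction cs with
  | nil =>
    intro val out chk hne
    simp only [List.foldl_nil, procB]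
    rw [List.append_nil]
    exact (dropLast_getLastD out [] hne).symm
  | cons c cs ih =>
    intro val out chk hne
    rw [List.foldl_cons]
    by_cases hc : c = ','
    · subst hc
      have hstep : usparserStep (out.length - 1, val, out, chk) ','
          = (out.length - 1, [], out.modify (out.length - 1) (· ++ [String.ofList val]), false) := by
        simp [usparserStep]
      rw [hstep, modify_last _ out hne]
      have hlen : (out.dropLast ++ [out.getLastD [] ++ [String.ofList val]]).length - 1
          = out.length - 1 := by
        cases out with
        | nil => exact absurd rfl hne
        | cons x t => simp
      rw [← hlen, ih [] _ false (by simp)]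
      simp [procB]
    · by_cases hn : c = '\n'
      · subst hn
        have hstep : usparserStep (out.length - 1, val, out, chk) '\n'
            = (out.length - 1 + 1, [],
               out.modify (out.length - 1) (· ++ [String.ofList val]) ++ [[]], chk) := by
          simp [usparserStep, hc]
        rw [hstep, modify_last _ out hne]
        have hlen : out.length - 1 + 1
            = ((out.dropLast ++ [out.getLastD [] ++ [String.ofList val]]) ++ [[]]).length - 1 := by
          cases out with
          | nil => exact absurd rfl hne
          | cons x t => simp
        rw [hlen, ih [] _ chk (by simp)]
        simp [procB, hc]
      · have hstep : usparserStep (out.length - 1, val, out, chk) c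
            = (out.length - 1, val ++ [c], out, chk) := by
          simp [usparserStep, hc, hn]
        rw [hstep, ih _ _ chk hne]
        simp [procB, hc, hn]

-- B's nested splits, written as structural recursion over the list of lines
def rowsL : List (List Char) → List (List String)
  | [] => [[]]
  | [l] => [((splitCh ',' l).map String.ofList).dropLast]
  | l :: l' :: ls => (splitCh ',' l).map String.ofList :: rowsL (l' :: ls)

lemma rowsL_eq : ∀ (lines : List (List Char)), lines ≠ [] →
    lines.dropLast.map (fun line => (splitCh ',' line).map String.ofList)
        ++ [((splitCh ',' (lines.getLastD [])).map String.ofList).dropLast]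
      = rowsL lines := by
  intro lines
  induction lines with
  | nil => intro h; exact absurd rfl h
  | cons l t ih =>
    intro _
    cases t with
    | nil => simp [rowsL]
    | cons l' ls =>
      rw [List.dropLast_cons_of_ne_nil (by simp), List.getLastD_cons,
        getLastD_irrel (l' :: ls) (by simp) l []]
      simp [rowsL, ← ih (by simp)]

-- B, characterised: the nested splits compute procB
lemma rows_eq_procB : ∀ (cs val : List Char), (∀ c ∈ val, c ≠ ',' ∧ c ≠ '\n') →
    rowsL (splitCh '\n' (val ++ cs)) = (procB cs val).1 :: (procB cs val).2 := by
  intro cs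
  induction cs with
  | nil =>
    intro val h
    have h1 : splitCh '\n' (val ++ []) = [val] := by
      simpa using splitCh_no_sep '\n' val (fun c hc => (h c hc).2)
    have h2 : splitCh ',' val = [val] := splitCh_no_sep ',' val (fun c hc => (h c hc).1)
    simp only [List.append_nil] at h1
    simp [rowsL, h1, h2, procB]
  | cons c cs ih =>
    intro val h
    have hih := ih [] (by simp)
    simp only [List.nil_append] at hih
    obtain ⟨r, rs, hS⟩ := splitCh_cons_shape '\n' cs
    by_cases hc : c = ','
    · subst hc
      have hnl : ∀ x ∈ val ++ [','], x ≠ '\n' := by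
        intro x hx
        rcases List.mem_append.1 hx with hx | hx
        · exact (h x hx).2
        · simp at hx; subst hx; decide
      have hL : splitCh '\n' (val ++ ',' :: cs) = (val ++ ',' :: r) :: rs := by
        rw [show val ++ ',' :: cs = (val ++ [',']) ++ cs by simp,
          splitCh_append_no_sep '\n' (val ++ [',']) cs hnl, hS]
        simp
      have hrow : splitCh ',' (val ++ ',' :: r) = val :: splitCh ',' r := by
        rw [splitCh_append_no_sep ',' val (',' :: r) (fun c hc => (h c hc).1)]
        simp only [splitCh, reduceIte]
        obtain ⟨q, qs, hq⟩ := splitCh_cons_shape ',' r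
        simp [hq]
      rw [hS] at hih
      rw [hL]
      cases rs with
      | nil =>
        simp only [rowsL, hrow, List.map_cons] at hih ⊢
        have hmr : (splitCh ',' r).map String.ofList ≠ [] := by
          simpa using splitCh_ne_nil ',' r
        rw [List.dropLast_cons_of_ne_nil hmr]
        injection hih with h1 h2
        have hu : procB (',' :: cs) val
            = (String.ofList val :: (procB cs []).1, (procB cs []).2) := by simp [procB]
        rw [hu, ← h1, ← h2]
      | cons a more =>
        simp only [rowsL, hrow, List.map_cons] at hih ⊢
        injection hih with h1 h2
        have hu : procB (',' :: cs) val
            = (String.ofList val :: (procB cs []).1, (procB cs []).2) := by simp [procB]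
        rw [hu, ← h1, ← h2]
    · by_cases hn : c = '\n'
      · subst hn
        have hL : splitCh '\n' (val ++ '\n' :: cs) = val :: r :: rs := by
          rw [splitCh_append_no_sep '\n' val ('\n' :: cs) (fun c hc => (h c hc).2)]
          simp only [splitCh, reduceIte, hS]
          simp
        have h2 : splitCh ',' val = [val] := splitCh_no_sep ',' val (fun c hc => (h c hc).1)
        rw [hS] at hih
        rw [hL]
        simp only [rowsL, h2, List.map_cons, List.map_nil, hih]
        simp [procB, hc]
      · have heq : val ++ c :: cs = (val ++ [c]) ++ cs := by simp
        rw [heq, ih (val ++ [c]) (by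
          intro x hx
          rcases List.mem_append.1 hx with hx | hx
          · exact h x hx
          · simp at hx; subst hx; exact ⟨hc, hn⟩)]
        simp [procB, hc, hn]

-- ===== VERDICT (by name: the statement is the Claim_ definition above) =====
theorem usparser_spec : Claim_equal_usparser := by
  intro input _
  unfold Spec_usparser usparser usparser_alt
  have hA := usparser_loop input.toList [] [[]] false (by simp)
  simp only [show ([[]] : List (List String)).length - 1 = 0 from rfl] at hA
  rw [hA]
  have hB := rows_eq_procB input.toList [] (by simp)
  simp only [List.nil_append] at hB
  simp only [splitOn_single]
  rw [rowsL_eq (splitCh '\n' input.toList) (splitCh_ne_nil '\n' input.toList), hB]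
  simp
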